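-- pv_equiv track=rewrite | github.com/viralvaghela/hacktoberfest_2021 | python/Naive_Bayes.py | get_unique_words
-- ===== SOURCE A (Python) =====
-- def get_unique_words(sentences):
--   """
--   Input: An array of sentences(array of words) obtained after preprocessing
--   Output: A dictionary of unique words, each with an assigned index to define the order
--   """
--   # A dictionary to track whether a word has been seen before or not
--   dic = {}
--   # Initialize an empty set of unique words
--   unique_words = {}
--   index = 0
--   for sentence in sentences:
--     for word in sentence:
--       if word not in dic:
--         dic[word] = 1
--         unique_words[word] = index
--         index += 1
--   return unique_words
-- ===== SOURCE B (Python) =====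
-- def get_unique_words(sentences):
--     # Different algorithm: scan the flattened words in REVERSE, overwriting a
--     # position dict (last write wins, so each word ends with its earliest
--     # position), then sort the distinct words by that first position and number them.
--     flat = [w for s in sentences for w in s]
--     first = {}
--     for p, w in reversed(list(enumerate(flat))):
--         first[w] = p
--     order = sorted(first, key=first.get)
--     return {w: i for i, w in enumerate(order)}
-- ===== Notes on version B (the rewrite author's own statement) =====
-- stated objective: alternative
-- what changed: Instead of a single forward detect-and-number loop over two dicts, B scans the flattened words in reverse overwriting a position dict (so each word keeps its earliest position), then sorts the distinct words by that first position and enumerates them.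
import Mathlib
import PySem

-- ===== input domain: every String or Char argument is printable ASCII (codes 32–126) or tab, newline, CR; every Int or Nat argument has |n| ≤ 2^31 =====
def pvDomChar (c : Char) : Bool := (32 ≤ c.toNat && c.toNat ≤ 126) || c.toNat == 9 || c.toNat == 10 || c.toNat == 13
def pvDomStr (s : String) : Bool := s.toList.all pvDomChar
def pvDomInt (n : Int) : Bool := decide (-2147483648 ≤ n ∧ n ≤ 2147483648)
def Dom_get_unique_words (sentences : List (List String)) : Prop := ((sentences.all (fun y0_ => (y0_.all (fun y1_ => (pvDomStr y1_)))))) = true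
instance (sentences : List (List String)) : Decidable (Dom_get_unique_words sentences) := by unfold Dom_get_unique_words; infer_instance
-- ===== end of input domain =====

-- B replaces A's forward detect-and-number loop by a reverse overwrite scan that records each
-- word's first position, then sorts the distinct words by that position; objective: alternative.

-- ===== PORT A =====
-- one body of A's inner loop: state = (dic, unique_words, index)
def guwStep (st : PySem.Dict String Int × PySem.Dict String Int × Int) (word : String) :
    PySem.Dict String Int × PySem.Dict String Int × Int :=
  if st.1.contains word then st
  else (st.1.insert word 1, st.2.1.insert word st.2.2, st.2.2 + 1)

def get_unique_words (sentences : List (List String)) : List (String × Int) :=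
  (sentences.foldl (fun st sentence => sentence.foldl guwStep st)
      (PySem.Dict.empty, PySem.Dict.empty, 0)).2.1.items

-- ===== PORT B =====
def get_unique_words_alt (sentences : List (List String)) : List (String × Int) :=
  let flat := sentences.flatMap id
  let first := ((PySem.List.enumerate flat 0).reverse).foldl
      (fun d pw => d.insert pw.2 pw.1) PySem.Dict.empty
  -- sorted(first, key=first.get): every key is present in `first`, so first.get w is the
  -- stored Int; getD with default 0 computes exactly that value here
  let order := PySem.List.sorted first.keys (fun w => first.getD w 0) false
  (PySem.List.enumerate order 0).map (fun p => (p.2, p.1))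

-- ===== PRECONDITION & SPEC =====
def Spec_get_unique_words (sentences : List (List String)) (out : List (String × Int)) : Prop := out = get_unique_words_alt sentences
instance (sentences : List (List String)) (out : List (String × Int)) : Decidable (Spec_get_unique_words sentences out) := by unfold Spec_get_unique_words; infer_instance

-- ===== CLAIM (what is proved, stated in full; the proofs are below) =====
def Claim_equal_get_unique_words : Prop := ∀ (sentences : List (List String)), Dom_get_unique_words sentences → Spec_get_unique_words sentences (get_unique_words sentences)

-- ===== LEMMAS AND PROOFS =====

-- A's loop state after having seen exactly the distinct words L (in first-seen order)
def guwState (L : List String) : PySem.Dict String Int × PySem.Dict String Int × Int :=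
  (PySem.Dict.mk (L.map (fun w => (w, (1 : Int)))),
   PySem.Dict.mk ((PySem.List.enumerate L 0).map (fun p => (p.2, p.1))),
   (L.length : Int))

theorem guwState_contains (L : List String) (w : String) :
    (guwState L).1.contains w = L.contains w := by
  simp [guwState, PySem.Dict.contains_mk, List.any_map, Function.comp_def, List.any_beq']

theorem guwStep_state (L : List String) (w : String) :
    guwStep (guwState L) w = guwState (PySem.Set.add L w) := by
  unfold guwStep PySem.Set.add PySem.Set.contains
  rw [guwState_contains]
  by_cases hb : L.contains w
  · rw [if_pos hb, if_pos hb]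
  · have h : w ∉ L := by simpa using hb
    have hbf : L.contains w = false := by simpa using hb
    have hc : (guwState L).1.contains w = false := by rw [guwState_contains, hbf]
    have hc2 : (guwState L).2.1.contains w = false := by
      simp only [guwState, PySem.Dict.contains_mk, List.any_map, List.any_eq_false,
        Function.comp_def]
      intro p hp
      rcases (PySem.List.mem_enumerate_iff _ _ _).mp hp with ⟨k, hk, rfl⟩
      simp only [beq_iff_eq]
      intro hEq
      exact h (hEq ▸ List.getElem_mem hk)
    rw [if_neg hb, if_neg (by simpa using h)]
    refine Prod.ext ?_ (Prod.ext ?_ ?_)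
    · apply PySem.Dict.ext
      rw [PySem.Dict.items_insert_of_not_contains _ _ hc]
      simp [guwState]
    · apply PySem.Dict.ext
      rw [PySem.Dict.items_insert_of_not_contains _ _ hc2]
      simp [guwState, PySem.List.enumerate_append]
    · simp [guwState]

theorem guw_foldl (ws : List String) (L : List String) :
    ws.foldl guwStep (guwState L) = guwState (PySem.Set.update L ws) := by
  induction ws generalizing L with
  | nil => simp [PySem.Set.update]
  | cons w ws ih =>
    rw [List.foldl_cons, guwStep_state, ih]
    rfl

theorem guw_flatten (sentences : List (List String))
    (st : PySem.Dict String Int × PySem.Dict String Int × Int) :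
    sentences.foldl (fun st sentence => sentence.foldl guwStep st) st
      = (sentences.flatMap id).foldl guwStep st := by
  induction sentences generalizing st with
  | nil => simp
  | cons s ss ih => simp [List.foldl_append, ih]

-- B's reverse overwrite scan: the final value of each word is its FIRST position
theorem guw_first_getD (flat : List String) (s : Int) (d : PySem.Dict String Int)
    (w : String) (d0 : Int) :
    (((PySem.List.enumerate flat s).reverse).foldl
        (fun d pw => d.insert pw.2 pw.1) d).getD w d0
      = if w ∈ flat then s + (flat.idxOf w : Int) else d.getD w d0 := by
  induction flat generalizing s d with
  | nil => simp [PySem.List.enumerate_nil]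
  | cons x xs ih =>
    rw [PySem.List.enumerate_cons, List.reverse_cons, List.foldl_append]
    simp only [List.foldl_cons, List.foldl_nil]
    rw [PySem.Dict.getD_insert, ih]
    by_cases hwx : w = x
    · subst hwx
      simp [List.idxOf_cons_self]
    · simp only [List.mem_cons, hwx, false_or]
      by_cases hm : w ∈ xs
      · rw [if_pos hm, if_pos hm, List.idxOf_cons_ne _ (by exact fun h => hwx h.symm)]
        push_cast
        ring
      · simp [hm]

-- B's dict keys are the distinct words of the reversed flat list
theorem guw_first_keys (flat : List String) :
    (((PySem.List.enumerate flat 0).reverse).foldl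
        (fun d pw => d.insert pw.2 pw.1) (PySem.Dict.empty : PySem.Dict String Int)).keys
      = PySem.Set.ofList flat.reverse := by
  have h := PySem.Dict.keys_foldl_insert_key ((PySem.List.enumerate flat 0).reverse)
      (fun pw : Int × String => pw.2) (fun _ pw => pw.1)
      (PySem.Dict.empty : PySem.Dict String Int)
  refine Eq.trans h ?_
  rw [PySem.Dict.keys_empty, PySem.Set.update_nil_left, List.map_reverse,
    PySem.List.map_snd_enumerate]

-- the first-seen distinct words are strictly increasing in first-occurrence index
theorem guw_dedup_pairwise (flat : List String) :
    (PySem.Set.ofList flat).Pairwise (fun a b => flat.idxOf a < flat.idxOf b) := by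
  induction flat with
  | nil => simp [PySem.Set.ofList_nil]
  | cons x xs ih =>
    rw [PySem.Set.ofList_cons]
    refine List.Pairwise.cons ?_ ?_
    · intro b hb
      rcases (PySem.Set.mem_discard _ _ _).mp hb with ⟨_, hbx⟩
      rw [List.idxOf_cons_self, List.idxOf_cons_ne _ (by exact fun h => hbx h.symm)]
      omega
    · have hsub : (PySem.Set.discard (PySem.Set.ofList xs) x).Sublist (PySem.Set.ofList xs) := by
        simp only [PySem.Set.discard]
        exact List.filter_sublist
      have hp := ih.sublist hsub
      refine hp.imp_of_mem ?_
      intro a b ha hb hlt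
      have hax : a ≠ x := ((PySem.Set.mem_discard _ _ _).mp ha).2
      have hbx : b ≠ x := ((PySem.Set.mem_discard _ _ _).mp hb).2
      rw [List.idxOf_cons_ne _ (by exact fun h => hax h.symm),
          List.idxOf_cons_ne _ (by exact fun h => hbx h.symm)]
      omega

-- the sorted distinct keys are exactly the first-seen distinct words
theorem guw_order (flat : List String) :
    PySem.List.sorted
      (((PySem.List.enumerate flat 0).reverse).foldl
        (fun d pw => d.insert pw.2 pw.1) (PySem.Dict.empty : PySem.Dict String Int)).keys
      (fun w => (((PySem.List.enumerate flat 0).reverse).foldl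
        (fun d pw => d.insert pw.2 pw.1) (PySem.Dict.empty : PySem.Dict String Int)).getD w 0)
      false
      = PySem.Set.ofList flat := by
  apply PySem.List.sorted_eq_of_perm_of_pairwise_lt
  · rw [guw_first_keys]
    rw [List.perm_ext_iff_of_nodup (PySem.Set.nodup_ofList _) (PySem.Set.nodup_ofList _)]
    intro a
    rw [PySem.Set.mem_ofList, PySem.Set.mem_ofList, List.mem_reverse]
  · refine (guw_dedup_pairwise flat).imp_of_mem ?_
    intro a b ha hb hlt
    have ha' : a ∈ flat := (PySem.Set.mem_ofList _ _).mp ha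
    have hb' : b ∈ flat := (PySem.Set.mem_ofList _ _).mp hb
    rw [guw_first_getD, guw_first_getD, if_pos ha', if_pos hb']
    omega

-- ===== VERDICT (by name: the statement is the Claim_ definition above) =====
theorem get_unique_words_spec : Claim_equal_get_unique_words := by
  intro sentences _
  unfold Spec_get_unique_words get_unique_words
  simp only [get_unique_words_alt]
  rw [guw_flatten]
  have h0 : (PySem.Dict.empty, PySem.Dict.empty, (0:Int)) = guwState [] := rfl
  rw [h0, guw_foldl, guw_order]
  simp [guwState, PySem.Set.update_nil_left]
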